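-- pv_equiv track=rewrite | github.com/sweetzinc/dim-reduction | src/models/decoders.py | _calculate_convt_input_shape
-- ===== SOURCE A (Python) =====
-- from typing import List, Tuple
--
-- def _calculate_convt_input_shape(
--     final_shape: Tuple[int, int, int], filters: List[int], strides: int
-- ) -> Tuple[int, int, int]:
--     """
--     Calculate the starting shape for the Conv2DTranspose layers.
--
--     Args:
--         final_shape: Desired final output shape (e.g., (28, 28, 1)).
--         filters: List of filters for the Conv2DTranspose layers.
--         strides: Strides used in Conv2DTranspose layers.
--
--     Returns:
--         The starting shape for the Conv2DTranspose layers.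
--     """
--     height, width, channels = final_shape
--     for _ in filters:
--         height = (height + strides - 1) // strides  # Reverse stride calculation
--         width = (width + strides - 1) // strides
--     return (height, width, filters[0])
-- ===== SOURCE B (Python) =====
-- def _calculate_convt_input_shape(final_shape, filters, strides):
--     height, width, channels = final_shape
--     factor = strides ** len(filters)
--     hq, hr = divmod(height, factor)
--     wq, wr = divmod(width, factor)
--     return (hq + (1 if hr else 0), wq + (1 if wr else 0), filters[0])
-- ===== Notes on version B (the rewrite author's own statement) =====
-- stated objective: simpler
-- what changed: Replaces the per-filter loop of repeated ceil divisions by a single divmod by strides**len(filters), adding 1 when the remainder is nonzero, using the identity that iterated ceil-division by s equals one ceil-division by s^n (valid for strides >= 1, which Pre_ requires).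
-- outside the precondition, e.g. on _calculate_convt_input_shape((8, 16, -1), [5, 3, 0], -8): A returns (1, 1, 5), B returns (0, 0, 5); on _calculate_convt_input_shape((4, 4, 1), [8], 0): A raises ZeroDivisionError, B raises ZeroDivisionError; on _calculate_convt_input_shape((4, 4, 1), [], 2): A raises IndexError, B raises IndexError
import Mathlib
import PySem

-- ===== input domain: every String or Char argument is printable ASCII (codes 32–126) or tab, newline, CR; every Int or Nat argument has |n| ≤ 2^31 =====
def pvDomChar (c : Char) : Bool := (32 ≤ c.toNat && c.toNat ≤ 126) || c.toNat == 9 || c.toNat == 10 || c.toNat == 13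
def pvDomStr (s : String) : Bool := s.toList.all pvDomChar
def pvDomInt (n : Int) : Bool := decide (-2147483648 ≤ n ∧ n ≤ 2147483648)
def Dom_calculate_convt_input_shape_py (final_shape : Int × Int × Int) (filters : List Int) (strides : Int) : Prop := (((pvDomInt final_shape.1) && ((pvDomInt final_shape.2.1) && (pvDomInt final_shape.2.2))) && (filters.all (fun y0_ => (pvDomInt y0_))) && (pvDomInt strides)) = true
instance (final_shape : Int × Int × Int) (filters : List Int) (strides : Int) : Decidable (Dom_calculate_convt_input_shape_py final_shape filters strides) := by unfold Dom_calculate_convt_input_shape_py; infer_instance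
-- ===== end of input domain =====

-- B replaces A's per-filter loop of repeated ceil divisions by one divmod by
-- strides ^ len(filters), adding 1 when the remainder is nonzero (objective: simpler;
-- the identity needs strides ≥ 1, see Pre_).

-- ===== PORT A =====
-- loop 'for _ in filters: height = (height+strides-1)//strides; width = ...' as a fold over (height, width)
def calculate_convt_input_shape_py (final_shape : Int × Int × Int) (filters : List Int) (strides : Int) : Int × Int × Int :=
  let hw := filters.foldl
    (fun (p : Int × Int) _ =>
      (PySem.Int.floordiv (p.1 + strides - 1) strides,
       PySem.Int.floordiv (p.2 + strides - 1) strides))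
    (final_shape.1, final_shape.2.1)
  (hw.1, hw.2, (PySem.List.pyGet? filters 0).getD 0)

-- ===== PORT B =====
-- divmod(height, factor) → PySem.Int.divmod? (none = ZeroDivisionError, outside Pre_)
def calculate_convt_input_shape_py_alt (final_shape : Int × Int × Int) (filters : List Int) (strides : Int) : Int × Int × Int :=
  let factor := strides ^ filters.length
  let hqr := (PySem.Int.divmod? final_shape.1 factor).getD (0, 0)
  let wqr := (PySem.Int.divmod? final_shape.2.1 factor).getD (0, 0)
  (hqr.1 + (if hqr.2 ≠ 0 then 1 else 0),
   wqr.1 + (if wqr.2 ≠ 0 then 1 else 0),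
   (PySem.List.pyGet? filters 0).getD 0)

-- ===== PRECONDITION & SPEC =====
-- Pre_ excludes empty filters (A raises IndexError) and strides = 0 (ZeroDivisionError);
-- it also excludes negative strides, on which A returns values that are an accident of
-- floor division and meaningless as a conv-transpose stride, and B's single ceil division differs.
def Pre_calculate_convt_input_shape_py (final_shape : Int × Int × Int) (filters : List Int) (strides : Int) : Prop :=
  filters ≠ [] ∧ 1 ≤ strides
instance (final_shape : Int × Int × Int) (filters : List Int) (strides : Int) : Decidable (Pre_calculate_convt_input_shape_py final_shape filters strides) := by unfold Pre_calculate_convt_input_shape_py; infer_instance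

def pvWitness_calculate_convt_input_shape_py : (Int × Int × Int) × List Int × Int := ((28, 28, 1), [32, 64], 2)

def Spec_calculate_convt_input_shape_py (final_shape : Int × Int × Int) (filters : List Int) (strides : Int) (out : Int × Int × Int) : Prop := out = calculate_convt_input_shape_py_alt final_shape filters strides
instance (final_shape : Int × Int × Int) (filters : List Int) (strides : Int) (out : Int × Int × Int) : Decidable (Spec_calculate_convt_input_shape_py final_shape filters strides out) := by unfold Spec_calculate_convt_input_shape_py; infer_instance

-- ===== CLAIM (what is proved, stated in full; the proofs are below) =====
def Claim_equal_calculate_convt_input_shape_py : Prop := ∀ (final_shape : Int × Int × Int) (filters : List Int) (strides : Int), Dom_calculate_convt_input_shape_py final_shape filters strides → Pre_calculate_convt_input_shape_py final_shape filters strides → Spec_calculate_convt_input_shape_py final_shape filters strides (calculate_convt_input_shape_py final_shape filters strides)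

-- ===== LEMMAS AND PROOFS =====

-- composing two ceil divisions: ⌈⌈h/s⌉/t⌉ = ⌈h/(s*t)⌉ for positive s, t
theorem pv_ceil_comp (h s t : Int) (hs : 0 < s) (ht : 0 < t) :
    PySem.Int.floordiv (PySem.Int.floordiv (h + s - 1) s + t - 1) t
      = PySem.Int.floordiv (h + s * t - 1) (s * t) := by
  have hst : 0 < s * t := mul_pos hs ht
  obtain ⟨h1, h2⟩ := (PySem.Int.floordiv_eq_iff_of_pos (a := h + s - 1) hs).mp rfl
  obtain ⟨h3, h4⟩ := (PySem.Int.floordiv_eq_iff_of_pos (a := h + s * t - 1) hst).mp rfl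
  rw [PySem.Int.floordiv_eq_iff_of_pos ht]
  constructor <;> nlinarith

-- A's fold over the pair equals a single ceil division by s ^ length
theorem pv_fold_closed (l : List Int) (s : Int) (hs : 0 < s) : ∀ h w : Int,
    l.foldl (fun (p : Int × Int) _ =>
        (PySem.Int.floordiv (p.1 + s - 1) s, PySem.Int.floordiv (p.2 + s - 1) s)) (h, w)
      = (PySem.Int.floordiv (h + s ^ l.length - 1) (s ^ l.length),
         PySem.Int.floordiv (w + s ^ l.length - 1) (s ^ l.length)) := by
  induction l with
  | nil =>
    intro h w
    simp only [List.foldl_nil, List.length_nil, pow_zero]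
    have e : ∀ x : Int, PySem.Int.floordiv (x + 1 - 1) 1 = x := by
      intro x; rw [PySem.Int.floordiv_eq_iff_of_pos one_pos]; omega
    rw [e h, e w]
  | cons a l ih =>
    intro h w
    have hpow : 0 < s ^ l.length := pow_pos hs _
    simp only [List.foldl_cons, ih, List.length_cons, pow_succ']
    rw [pv_ceil_comp h s (s ^ l.length) hs hpow, pv_ceil_comp w s (s ^ l.length) hs hpow]

-- ceiling division A's way equals B's divmod way: (h+f-1)//f = h//f + (1 if h%f else 0), for 0 < f
theorem pv_ceil_divmod (h f : Int) (hf : 0 < f) :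
    PySem.Int.floordiv (h + f - 1) f
      = ((PySem.Int.divmod? h f).getD (0, 0)).1
        + (if ((PySem.Int.divmod? h f).getD (0, 0)).2 ≠ 0 then 1 else 0) := by
  have hf0 : f ≠ 0 := ne_of_gt hf
  simp only [PySem.Int.divmod?, if_neg hf0, Option.getD_some]
  have hfd : Int.fdiv h f = PySem.Int.floordiv h f := rfl
  have hfm : Int.fmod h f = PySem.Int.mod h f := rfl
  rw [hfd, hfm]
  have hq : PySem.Int.floordiv h f * f + PySem.Int.mod h f = h :=
    PySem.Int.floordiv_mul_add_mod h f
  have hr0 : 0 ≤ PySem.Int.mod h f := PySem.Int.mod_nonneg h hf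
  have hr1 : PySem.Int.mod h f < f := PySem.Int.mod_lt h hf
  rw [PySem.Int.floordiv_eq_iff_of_pos hf]
  split_ifs with hne
  · have hr2 : 1 ≤ PySem.Int.mod h f := by omega
    constructor <;> nlinarith [hq, hr2, hr1]
  · have hr2 : PySem.Int.mod h f = 0 := by omega
    constructor <;> nlinarith [hq, hr2, hr1]

-- ===== VERDICT (by name: the statement is the Claim_ definition above) =====
theorem calculate_convt_input_shape_py_spec : Claim_equal_calculate_convt_input_shape_py := by
  intro fs filters strides _ hpre
  obtain ⟨-, hs⟩ := hpre
  have hs' : 0 < strides := hs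
  have hpow : 0 < strides ^ filters.length := pow_pos hs' _
  unfold Spec_calculate_convt_input_shape_py calculate_convt_input_shape_py calculate_convt_input_shape_py_alt
  simp only [pv_fold_closed filters strides hs' fs.1 fs.2.1,
    pv_ceil_divmod fs.1 _ hpow, pv_ceil_divmod fs.2.1 _ hpow]
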